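-- pv_equiv track=rewrite | github.com/eleihu6-rgb/Royce-HomeKit-Mini | scripts/fix_failed_tables.py | count_values_in_row
-- ===== SOURCE A (Python) =====
-- def count_values_in_row(row_str):
--     """
--     Count comma-separated values in a row like (val1, val2, 'str,with,comma', NULL).
--     Handles: quoted strings, NULL, numbers, nested single-row parens.
--     Returns count of top-level values.
--     """
--     # Strip surrounding parens
--     row_str = row_str.strip()
--     if row_str.startswith('('):
--         row_str = row_str[1:]
--     if row_str.endswith(')') or row_str.endswith('),') or row_str.endswith(');'):
--         row_str = row_str.rstrip(';').rstrip(',').rstrip(')')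
--
--     count = 1
--     in_string = False
--     escape_next = False
--     quote_char = None
--
--     for ch in row_str:
--         if escape_next:
--             escape_next = False
--             continue
--         if ch == '\\' and in_string:
--             escape_next = True
--             continue
--         if in_string:
--             if ch == quote_char:
--                 in_string = False
--         else:
--             if ch in ("'", '"'):
--                 in_string = True
--                 quote_char = ch
--             elif ch == ',':
--                 count += 1
--
--     return count
-- ===== SOURCE B (Python) =====
-- def count_values_in_row(row_str):
--     s = row_str.strip()
--     if s.startswith('('):
--         s = s[1:]
--     if s.endswith(')') or s.endswith('),') or s.endswith(');'):
--         s = s.rstrip(';').rstrip(',').rstrip(')')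
--     # Phase 1: delete every quoted string literal (with backslash escapes),
--     # keeping only the top-level characters.
--     out = []
--     i, n = 0, len(s)
--     while i < n:
--         ch = s[i]
--         i += 1
--         if ch == "'" or ch == '"':
--             while i < n:
--                 c = s[i]
--                 i += 1
--                 if c == '\\':
--                     i += 1
--                 elif c == ch:
--                     break
--         else:
--             out.append(ch)
--     # Phase 2: every remaining comma is a top-level separator.
--     return ''.join(out).count(',') + 1
-- ===== Notes on version B (the rewrite author's own statement) =====
-- stated objective: alternative
-- what changed: Replaces the single-pass boolean state machine (in_string/escape_next/quote_char flags) by a two-phase algorithm: first delete every quoted literal with a nested skip-the-string scan, then count the remaining commas and add 1.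
import Mathlib
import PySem

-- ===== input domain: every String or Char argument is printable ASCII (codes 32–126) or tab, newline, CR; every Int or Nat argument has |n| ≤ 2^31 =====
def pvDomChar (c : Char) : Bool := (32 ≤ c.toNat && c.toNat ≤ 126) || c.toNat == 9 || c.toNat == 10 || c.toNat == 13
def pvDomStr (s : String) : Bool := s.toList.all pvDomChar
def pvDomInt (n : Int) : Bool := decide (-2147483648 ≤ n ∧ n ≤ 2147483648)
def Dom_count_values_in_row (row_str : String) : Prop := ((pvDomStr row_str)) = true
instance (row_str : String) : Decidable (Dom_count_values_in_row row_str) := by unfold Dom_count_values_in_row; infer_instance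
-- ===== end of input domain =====

-- B keeps A's paren/semicolon stripping block verbatim and replaces the flag state machine
-- by delete-quoted-literals-then-count-commas; both Pythons share the strip block byte for byte,
-- so both ports share its transliteration pvStripRow.

-- s.rstrip(c) for a single-character chars argument (hand port, exact: drops every trailing c)
def pvRstripChar (cs : List Char) (c : Char) : List Char :=
  (cs.reverse.dropWhile (· == c)).reverse

-- the shared prefix/suffix strip block of both Pythons (identical source lines)
def pvStripRow (row_str : String) : List Char :=
  let cs := PySem.Chars.strip row_str.toList
  let cs := if PySem.Chars.startswith cs ['('] then PySem.List.slice cs (some 1) none else cs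
  if PySem.Chars.endswith cs [')'] || PySem.Chars.endswith cs [')', ','] ||
      PySem.Chars.endswith cs [')', ';'] then
    pvRstripChar (pvRstripChar (pvRstripChar cs ';') ',') ')'
  else cs

-- ===== PORT A =====
-- loop state: (count, in_string, escape_next, quote_char)
def pvStepA (st : Int × Bool × Bool × Option Char) (ch : Char) : Int × Bool × Bool × Option Char :=
  let (count, in_string, escape_next, quote) := st
  if escape_next then (count, in_string, false, quote)
  else if ch = '\\' ∧ in_string then (count, in_string, true, quote)
  else if in_string then
    (if some ch = quote then (count, false, escape_next, quote) else st)
  else if ch = '\'' ∨ ch = '"' then (count, true, escape_next, some ch)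
  else if ch = ',' then (count + 1, in_string, escape_next, quote)
  else st

def count_values_in_row (row_str : String) : Int :=
  ((pvStripRow row_str).foldl pvStepA (1, false, false, none)).1

-- ===== PORT B =====
-- inner while loop: consume a quoted literal opened with quote q, return the rest
def pvSkipStr : List Char → Char → List Char
  | [], _ => []
  | c :: rest, q =>
    if c = '\\' then pvSkipStr (rest.drop 1) q
    else if c = q then rest
    else pvSkipStr rest q
termination_by cs _ => cs.length
decreasing_by
  all_goals (simp only [List.length_drop, List.length_cons]; omega)

theorem pvSkipStr_length_le (cs : List Char) (q : Char) :
    (pvSkipStr cs q).length ≤ cs.length := by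
  fun_induction pvSkipStr cs q
  all_goals simp_all
  all_goals omega

-- outer while loop: keep top-level characters, drop quoted literals
def pvClean : List Char → List Char
  | [] => []
  | c :: rest =>
    if c = '\'' ∨ c = '"' then pvClean (pvSkipStr rest c)
    else c :: pvClean rest
termination_by cs => cs.length
decreasing_by
  · have := pvSkipStr_length_le rest c; simp only [List.length_cons]; omega
  · simp only [List.length_cons]; omega

def count_values_in_row_alt (row_str : String) : Int :=
  ((pvClean (pvStripRow row_str)).count ',' : Int) + 1

-- ===== PRECONDITION & SPEC =====
def Spec_count_values_in_row (row_str : String) (out : Int) : Prop := out = count_values_in_row_alt row_str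
instance (row_str : String) (out : Int) : Decidable (Spec_count_values_in_row row_str out) := by unfold Spec_count_values_in_row; infer_instance

-- ===== CLAIM (what is proved, stated in full; the proofs are below) =====
def Claim_equal_count_values_in_row : Prop := ∀ (row_str : String), Dom_count_values_in_row row_str → Spec_count_values_in_row row_str (count_values_in_row row_str)

-- ===== LEMMAS AND PROOFS =====

-- how one step of A's state machine acts, by case
theorem stepA_top_quote (count : Int) (q0 : Option Char) (c : Char) (h : c = '\'' ∨ c = '"') :
    pvStepA (count, false, false, q0) c = (count, true, false, some c) := by
  simp [pvStepA, h]

theorem stepA_top_comma (count : Int) (q0 : Option Char) :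
    pvStepA (count, false, false, q0) ',' = (count + 1, false, false, q0) := by
  simp [pvStepA]

theorem stepA_top_other (count : Int) (q0 : Option Char) (c : Char)
    (h : ¬ (c = '\'' ∨ c = '"')) (h2 : c ≠ ',') :
    pvStepA (count, false, false, q0) c = (count, false, false, q0) := by
  simp [pvStepA, h, h2]

theorem stepA_in_bs (count : Int) (q : Char) :
    pvStepA (count, true, false, some q) '\\' = (count, true, true, some q) := by
  simp [pvStepA]

theorem stepA_esc (count : Int) (q : Option Char) (b : Bool) (d : Char) :
    pvStepA (count, b, true, q) d = (count, b, false, q) := by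
  simp [pvStepA]

theorem stepA_in_close (count : Int) (c : Char) (hbs : c ≠ '\\') :
    pvStepA (count, true, false, some c) c = (count, false, false, some c) := by
  simp [pvStepA, hbs]

theorem stepA_in_other (count : Int) (q : Char) (c : Char) (hbs : c ≠ '\\') (h : c ≠ q) :
    pvStepA (count, true, false, some q) c = (count, true, false, some q) := by
  simp [pvStepA, hbs, h]

-- the state machine of A, run from a top-level state resp. an in-string state,
-- counts exactly the commas B's pvClean keeps
theorem pvMain (n : Nat) : ∀ cs : List Char, cs.length ≤ n →
    (∀ (count : Int) (q0 : Option Char),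
      (cs.foldl pvStepA (count, false, false, q0)).1 = count + ((pvClean cs).count ',' : Int))
    ∧ (∀ (count : Int) (q : Char),
      (cs.foldl pvStepA (count, true, false, some q)).1
        = count + ((pvClean (pvSkipStr cs q)).count ',' : Int)) := by
  induction n with
  | zero =>
    intro cs hcs
    have : cs = [] := List.eq_nil_of_length_eq_zero (Nat.le_zero.mp hcs)
    subst this
    constructor <;> intro count q <;> simp [pvClean, pvSkipStr]
  | succ n ih =>
    intro cs hcs
    match cs with
    | [] => constructor <;> intro count q <;> simp [pvClean, pvSkipStr]
    | c :: rest =>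
      simp only [List.length_cons, Nat.succ_le_succ_iff] at hcs
      constructor
      · intro count q0
        by_cases hq : c = '\'' ∨ c = '"'
        · rw [List.foldl_cons, stepA_top_quote count q0 c hq, (ih rest hcs).2 count c]
          simp [pvClean, hq]
        · by_cases hcom : c = ','
          · subst hcom
            rw [List.foldl_cons, stepA_top_comma count q0, (ih rest hcs).1 (count + 1) q0]
            simp [pvClean, hq]
            ring
          · rw [List.foldl_cons, stepA_top_other count q0 c hq hcom, (ih rest hcs).1 count q0]
            simp [pvClean, hq, hcom]
      · intro count q
        by_cases hbs : c = '\\'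
        · subst hbs
          rw [List.foldl_cons, stepA_in_bs count q]
          match rest with
          | [] => simp [pvSkipStr, pvClean]
          | d :: rest' =>
            have hr : rest'.length ≤ n := by simp at hcs; omega
            rw [List.foldl_cons, stepA_esc count (some q) true d]
            rw [(ih rest' hr).2 count q]
            simp [pvSkipStr]
        · by_cases hcq : c = q
          · subst hcq
            rw [List.foldl_cons, stepA_in_close count c hbs, (ih rest hcs).1 count (some c)]
            simp [pvSkipStr, hbs]
          · rw [List.foldl_cons, stepA_in_other count q c hbs hcq, (ih rest hcs).2 count q]
            simp [pvSkipStr, hbs, hcq]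

-- ===== VERDICT (by name: the statement is the Claim_ definition above) =====
theorem count_values_in_row_spec : Claim_equal_count_values_in_row := by
  intro row_str _
  show count_values_in_row row_str = count_values_in_row_alt row_str
  unfold count_values_in_row count_values_in_row_alt
  rw [(pvMain (pvStripRow row_str).length (pvStripRow row_str) le_rfl).1 1 none]
  ring
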